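-- pv_equiv track=rewrite | github.com/wielgos/WDI | zestaw5/zad4.py | podciagi_ar
-- ===== SOURCE A (Python) =====
-- def podciagi_ar(t):
--     N = len(t)
--     ciagi = 0
--     for i in range(N-2):
--         a1 = t[i]
--         for k in range(i+1,N-1):
--             a2 = t[k]
--             r = a2-a1
--             dl_ciagu = 2
--             for l in range(k+1,N):
--                 if t[l] == a2 + r:
--                     dl_ciagu += 1
--                     a2 = t[l]
--             ciagi += dl_ciagu-2
--     return ciagi
-- ===== SOURCE B (Python) =====
-- def podciagi_ar(t):
--     N = len(t)
--     d = {}      # value -> nearest index to the right of the current k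
--     L = {}      # (k, r) -> greedy extension count of the chain starting at k with step r
--     total = 0
--     for k in range(N - 1, -1, -1):
--         for i in range(k):
--             r = t[k] - t[i]
--             if (k, r) not in L:
--                 j = d.get(t[k] + r)
--                 L[(k, r)] = 0 if j is None else 1 + L[(j, r)]
--             total += L[(k, r)]
--         d[t[k]] = k
--     return total
-- ===== Notes on version B (the rewrite author's own statement) =====
-- stated objective: faster
-- what changed: A rescans the tail greedily for every start pair (cubic); B makes one backward pass keeping a dict of each value's next occurrence and a memo dict of greedy-chain extension counts per (position, step), so each pair's contribution is a constant-time lookup/extension.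
import Mathlib
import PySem

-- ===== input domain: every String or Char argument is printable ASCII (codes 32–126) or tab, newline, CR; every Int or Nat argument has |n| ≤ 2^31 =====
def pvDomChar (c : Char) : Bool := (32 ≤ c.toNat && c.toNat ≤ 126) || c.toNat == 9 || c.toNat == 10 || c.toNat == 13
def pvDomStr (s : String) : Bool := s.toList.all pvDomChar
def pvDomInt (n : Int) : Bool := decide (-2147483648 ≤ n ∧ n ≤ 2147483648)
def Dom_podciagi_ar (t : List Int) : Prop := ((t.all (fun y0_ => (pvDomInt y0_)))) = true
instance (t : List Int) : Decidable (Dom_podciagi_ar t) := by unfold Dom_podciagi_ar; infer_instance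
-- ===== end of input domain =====

-- B replaces A's cubic triple loop by a backward memoized DP (dict of next occurrences +
-- dict of greedy-chain extension counts per (position, step)); equivalence of the return
-- values is proved on the whole domain.

-- ===== PORT A =====
def podciagi_ar (t : List Int) : Int :=
  let N : Int := PySem.List.len t
  (PySem.List.pyRange 0 (N - 2)).foldl (fun ciagi i =>
    let a1 := PySem.List.pyGetD t i 0
    (PySem.List.pyRange (i + 1) (N - 1)).foldl (fun ciagi k =>
      let a2 := PySem.List.pyGetD t k 0
      let r := a2 - a1
      -- inner 'for l' loop carries the running state (a2, dl_ciagu)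
      let res := (PySem.List.pyRange (k + 1) N).foldl
        (fun (st : Int × Int) l =>
          if PySem.List.pyGetD t l 0 = st.1 + r then (PySem.List.pyGetD t l 0, st.2 + 1) else st)
        (a2, 2)
      ciagi + (res.2 - 2)) ciagi) 0

-- ===== PORT B =====
-- body of B's inner 'for i' loop: state (L, total)
def bInnerStep (t : List Int) (d : PySem.Dict Int Int) (tk k : Int)
    (st : PySem.Dict (Int × Int) Int × Int) (i : Int) : PySem.Dict (Int × Int) Int × Int :=
  let r := tk - PySem.List.pyGetD t i 0
  let L :=
    if st.1.contains (k, r) then st.1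
    else
      match d.get? (tk + r) with
      | none => st.1.insert (k, r) 0
      | some j => st.1.insert (k, r) (1 + st.1.getD (j, r) 0)
  (L, st.2 + L.getD (k, r) 0)

-- body of B's outer 'for k' loop: state (d, L, total)
def bOuterStep (t : List Int)
    (st : PySem.Dict Int Int × PySem.Dict (Int × Int) Int × Int) (k : Int) :
    PySem.Dict Int Int × PySem.Dict (Int × Int) Int × Int :=
  let tk := PySem.List.pyGetD t k 0
  let inner := (PySem.List.pyRange 0 k).foldl (bInnerStep t st.1 tk k) (st.2.1, st.2.2)
  (st.1.insert tk k, inner.1, inner.2)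

def podciagi_ar_alt (t : List Int) : Int :=
  let N : Int := PySem.List.len t
  let st := (PySem.List.pyRange (N - 1) (-1) (-1)).foldl (bOuterStep t)
    (PySem.Dict.empty, PySem.Dict.empty, 0)
  st.2.2

-- ===== PRECONDITION & SPEC =====
def Spec_podciagi_ar (t : List Int) (out : Int) : Prop := out = podciagi_ar_alt t
instance (t : List Int) (out : Int) : Decidable (Spec_podciagi_ar t out) := by unfold Spec_podciagi_ar; infer_instance

-- ===== CLAIM (what is proved, stated in full; the proofs are below) =====
def Claim_equal_podciagi_ar : Prop := ∀ (t : List Int), Dom_podciagi_ar t → Spec_podciagi_ar t (podciagi_ar t)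

-- ===== LEMMAS AND PROOFS =====

-- greedy extension count: scanning the rest of the list with current value a2 and step r
def g : List Int → Int → Int → Int
  | [], _, _ => 0
  | x :: xs, a2, r => if x = a2 + r then 1 + g xs x r else g xs a2 r

-- index (relative) of the first occurrence of v
def ffrom : List Int → Int → Option Nat
  | [], _ => none
  | x :: xs, v => if x = v then some 0 else (ffrom xs v).map (· + 1)

-- chain count starting right after position k with current value t[k]
def Gc (t : List Int) (k : Nat) (r : Int) : Int := g (t.drop (k + 1)) (t.getD k 0) r
-- contribution of the pair (i, k)
def Qc (t : List Int) (i k : Nat) : Int := Gc t k (t.getD k 0 - t.getD i 0)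

def TotalFrom (t : List Int) (m : Nat) : Int :=
  ∑ k ∈ Finset.Ico m t.length, ∑ i ∈ Finset.range k, Qc t i k

-- every value stored in L is the chain count of its key
def SoundL (t : List Int) (L : PySem.Dict (Int × Int) Int) : Prop :=
  ∀ (k' : Nat) (r c : Int), k' < t.length → L.get? (((k' : Nat) : Int), r) = some c → c = Gc t k' r

-- all pairs with larger index ≥ m are already tabulated
def CompleteL (t : List Int) (m : Nat) (L : PySem.Dict (Int × Int) Int) : Prop :=
  ∀ (k' i : Nat), m ≤ k' → k' < t.length → i < k' →
    L.contains (((k' : Nat) : Int), t.getD k' 0 - t.getD i 0) = true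

-- d maps each value to its first index ≥ m
def InvD (t : List Int) (m : Nat) (d : PySem.Dict Int Int) : Prop :=
  ∀ v : Int, d.get? v = (ffrom (t.drop m) v).map (fun j => ((m + j : Nat) : Int))

lemma g_of_ffrom_none (s : List Int) (a2 r : Int) (h : ffrom s (a2 + r) = none) :
    g s a2 r = 0 := by
  induction s generalizing a2 with
  | nil => rfl
  | cons x xs ih =>
      simp only [ffrom] at h
      by_cases hx : x = a2 + r
      · simp [hx] at h
      · simp only [g, if_neg hx]
        exact ih a2 (by simpa [hx] using h)

lemma g_of_ffrom_some (s : List Int) (a2 r : Int) (m : Nat)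
    (h : ffrom s (a2 + r) = some m) :
    g s a2 r = 1 + g (s.drop (m + 1)) (a2 + r) r := by
  induction s generalizing a2 m with
  | nil => simp [ffrom] at h
  | cons x xs ih =>
      simp only [ffrom] at h
      by_cases hx : x = a2 + r
      · simp [hx] at h
        subst h
        simp [g, hx]
      · simp only [if_neg hx, Option.map_eq_some_iff] at h
        obtain ⟨m', hm', rfl⟩ := h
        simp only [g, if_neg hx, List.drop_succ_cons]
        exact ih a2 m' hm'

lemma ffrom_spec (s : List Int) (v : Int) (m : Nat) (h : ffrom s v = some m) :
    m < s.length ∧ s.getD m 0 = v := by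
  induction s generalizing m with
  | nil => simp [ffrom] at h
  | cons x xs ih =>
      simp only [ffrom] at h
      by_cases hx : x = v
      · simp [hx] at h
        subst h
        simp [hx]
      · simp only [if_neg hx, Option.map_eq_some_iff] at h
        obtain ⟨m', hm', rfl⟩ := h
        obtain ⟨h1, h2⟩ := ih m' hm'
        refine ⟨?_, by simpa using h2⟩
        simp only [List.length_cons]
        omega

lemma sum_map_range (n : Nat) (f : Nat → Int) :
    ((List.range n).map f).sum = ∑ i ∈ Finset.range n, f i := by
  induction n with
  | zero => simp
  | succ n ih => simp [List.range_succ, Finset.sum_range_succ, ih]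

-- A's innermost loop computes 2 + (greedy extension count)
lemma innerSnd (rest : List Int) (r : Int) : ∀ (a2 dl : Int),
    (rest.foldl (fun (st : Int × Int) x =>
      if x = st.1 + r then (x, st.2 + 1) else st) (a2, dl)).2 = dl + g rest a2 r := by
  induction rest with
  | nil => intro a2 dl; simp [g]
  | cons x xs ih =>
      intro a2 dl
      by_cases hx : x = a2 + r
      · simp only [List.foldl_cons, if_pos hx, g, ih x (dl + 1)]
        ring
      · simp only [List.foldl_cons, if_neg hx, g, ih a2 dl]

lemma qc_zero_of_large (t : List Int) (i k : Nat) (hk : t.length ≤ k + 1) :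
    Qc t i k = 0 := by
  unfold Qc Gc
  rw [List.drop_eq_nil_of_le hk]
  rfl

-- the per-pair contribution, Int-indexed as in A's loops
def PIfun (t : List Int) (i k : Int) : Int :=
  g (t.drop (k + 1).toNat) (PySem.List.pyGetD t k 0)
    (PySem.List.pyGetD t k 0 - PySem.List.pyGetD t i 0)

lemma a_step1 (t : List Int) :
    podciagi_ar t = ((PySem.List.pyRange 0 ((t.length : Int) - 2)).map (fun i =>
      ((PySem.List.pyRange (i + 1) ((t.length : Int) - 1)).map (PIfun t i)).sum)).sum := by
  show List.foldl _ 0 (PySem.List.pyRange 0 (PySem.List.len t - 2)) = _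
  have hlen : PySem.List.len t = (t.length : Int) := rfl
  rw [hlen]
  rw [PySem.List.foldl_congr_mem' _ _
    (fun acc i => acc + ((PySem.List.pyRange (i + 1) ((t.length : Int) - 1)).map (PIfun t i)).sum)
    0 ?_]
  · rw [PySem.List.foldl_add]; simp
  · intro i hi acc
    have hi0 : 0 ≤ i := (PySem.List.mem_pyRange_one.mp hi).1
    show List.foldl _ acc (PySem.List.pyRange (i + 1) ((t.length : Int) - 1)) = _
    rw [PySem.List.foldl_congr_mem' _ _ (fun acc k => acc + PIfun t i k) acc ?_]
    · rw [PySem.List.foldl_add]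
    · intro k hk acc2
      have hk1 : i + 1 ≤ k := (PySem.List.mem_pyRange_one.mp hk).1
      show acc2 + ((List.foldl
          (fun (st : Int × Int) l =>
            if PySem.List.pyGetD t l 0 = st.1 +
                (PySem.List.pyGetD t k 0 - PySem.List.pyGetD t i 0) then
              (PySem.List.pyGetD t l 0, st.2 + 1)
            else st)
          (PySem.List.pyGetD t k 0, 2)
          (PySem.List.pyRange (k + 1) ((t.length : Int)))).2 - 2) = acc2 + PIfun t i k
      rw [← hlen,
        PySem.List.foldl_pyRange_pyGetD t 0
          (fun (st : Int × Int) x =>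
            if x = st.1 + (PySem.List.pyGetD t k 0 - PySem.List.pyGetD t i 0) then
              (x, st.2 + 1)
            else st)
          (PySem.List.pyGetD t k 0, 2) (by omega : (0:Int) ≤ k + 1)]
      rw [innerSnd]
      unfold PIfun
      ring

lemma a_step2 (t : List Int) :
    podciagi_ar t = ∑ i ∈ Finset.range (t.length - 2),
      ∑ k ∈ Finset.Ico (i + 1) (t.length - 1), Qc t i k := by
  rw [a_step1]
  rw [PySem.List.pyRange_one, List.map_map]
  have h2 : (((t.length : Int) - 2) - 0).toNat = t.length - 2 := by omega
  rw [h2, sum_map_range]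
  refine Finset.sum_congr rfl ?_
  intro i hi
  rw [Finset.sum_Ico_eq_sum_range]
  simp only [Function.comp]
  rw [PySem.List.pyRange_one, List.map_map, sum_map_range]
  have h1 : (((t.length : Int) - 1) - ((0 : Int) + (i : Int) + 1)).toNat
      = t.length - 1 - (i + 1) := by omega
  rw [h1]
  refine Finset.sum_congr rfl ?_
  intro j hj
  show PIfun t (0 + (i : Int)) (0 + (i : Int) + 1 + (j : Int)) = Qc t i (i + 1 + j)
  unfold PIfun Qc Gc
  rw [PySem.List.pyGetD_of_nonneg t (i := 0 + (i:Int) + 1 + (j:Int)) 0 (by positivity),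
      PySem.List.pyGetD_of_nonneg t (i := 0 + (i:Int)) 0 (by positivity)]
  have e1 : ((0 : Int) + (i:Int) + 1 + (j:Int) + 1).toNat = i + 1 + j + 1 := by omega
  have e2 : ((0 : Int) + (i:Int) + 1 + (j:Int)).toNat = i + 1 + j := by omega
  have e3 : ((0 : Int) + (i:Int)).toNat = i := by omega
  rw [e1, e2, e3]

lemma a_eq (t : List Int) : podciagi_ar t = TotalFrom t 0 := by
  rw [a_step2]
  set n := t.length with hn
  have hinner : ∀ i : Nat, ∑ k ∈ Finset.Ico (i + 1) (n - 1), Qc t i k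
      = ∑ k ∈ Finset.Ico (i + 1) n, Qc t i k := by
    intro i
    refine Finset.sum_subset (Finset.Ico_subset_Ico le_rfl (by omega)) ?_
    intro x hx hx'
    simp only [Finset.mem_Ico] at hx hx'
    exact qc_zero_of_large t i x (by omega)
  have houter : ∑ i ∈ Finset.range (n - 2), ∑ k ∈ Finset.Ico (i + 1) (n - 1), Qc t i k
      = ∑ i ∈ Finset.range n, ∑ k ∈ Finset.Ico (i + 1) n, Qc t i k := by
    calc ∑ i ∈ Finset.range (n - 2), ∑ k ∈ Finset.Ico (i + 1) (n - 1), Qc t i k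
        = ∑ i ∈ Finset.range (n - 2), ∑ k ∈ Finset.Ico (i + 1) n, Qc t i k := by
          exact Finset.sum_congr rfl (fun i _ => hinner i)
      _ = ∑ i ∈ Finset.range n, ∑ k ∈ Finset.Ico (i + 1) n, Qc t i k := by
          refine Finset.sum_subset ?_ ?_
          · intro x hx
            simp only [Finset.mem_range] at hx ⊢
            omega
          intro i hi hi'
          simp only [Finset.mem_range] at hi hi'
          refine Finset.sum_eq_zero ?_
          intro k hk
          simp only [Finset.mem_Ico] at hk
          exact qc_zero_of_large t i k (by omega)
  rw [houter]
  have hfilt : ∀ i : Nat, ∑ k ∈ Finset.Ico (i + 1) n, Qc t i k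
      = ∑ k ∈ Finset.range n, if i < k then Qc t i k else 0 := by
    intro i
    rw [← Finset.sum_filter]
    refine Finset.sum_congr ?_ (fun _ _ => rfl)
    ext x
    simp only [Finset.mem_Ico, Finset.mem_filter, Finset.mem_range]
    omega
  calc ∑ i ∈ Finset.range n, ∑ k ∈ Finset.Ico (i + 1) n, Qc t i k
      = ∑ i ∈ Finset.range n, ∑ k ∈ Finset.range n, if i < k then Qc t i k else 0 := by
        exact Finset.sum_congr rfl (fun i _ => hfilt i)
    _ = ∑ k ∈ Finset.range n, ∑ i ∈ Finset.range n, if i < k then Qc t i k else 0 :=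
        Finset.sum_comm
    _ = ∑ k ∈ Finset.range n, ∑ i ∈ Finset.range k, Qc t i k := by
        refine Finset.sum_congr rfl ?_
        intro k hk
        simp only [Finset.mem_range] at hk
        rw [← Finset.sum_filter]
        refine Finset.sum_congr ?_ (fun _ _ => rfl)
        ext x
        simp only [Finset.mem_filter, Finset.mem_range]
        omega
    _ = TotalFrom t 0 := by
        unfold TotalFrom
        rw [← Finset.range_eq_Ico]

lemma pyRange_down_cons (n : Nat) :
    PySem.List.pyRange ((n : Int)) (-1) (-1)
      = (n : Int) :: PySem.List.pyRange ((n : Int) - 1) (-1) (-1) := by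
  simp only [PySem.List.pyRange]
  norm_num
  have e1 : (if (-1:Int) < (n:Int) then n + 1 else 0) = n + 1 := by
    rw [if_pos (by omega)]
  have e2 : (if 0 < n then n else 0) = n := by split_ifs <;> omega
  rw [e1, e2, List.range_succ_eq_map, List.map_cons, List.map_map]
  norm_num
  intro a _
  ring

lemma invD_init (t : List Int) : InvD t t.length PySem.Dict.empty := by
  intro v
  simp [PySem.Dict.get?_empty, List.drop_length, ffrom]

lemma invD_insert (t : List Int) (k : Nat) (hk : k < t.length)
    (d : PySem.Dict Int Int) (h : InvD t (k + 1) d) :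
    InvD t k (d.insert (t.getD k 0) (k : Int)) := by
  intro v
  have hdrop : t.drop k = t.getD k 0 :: t.drop (k + 1) := by
    rw [List.drop_eq_getElem_cons hk, List.getD_eq_getElem t 0 hk]
  rw [hdrop, PySem.Dict.get?_insert]
  by_cases hv : v = t.getD k 0
  · subst hv
    simp [ffrom]
  · rw [if_neg hv]
    rw [h v]
    have hx : ¬ (t.getD k 0 = v) := fun h' => hv h'.symm
    simp only [ffrom, if_neg hx]
    cases hf : ffrom (t.drop (k + 1)) v with
    | none => simp
    | some j =>
        simp only [Option.map_some]
        congr 1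
        omega

lemma invD_none (t : List Int) (m : Nat) (d : PySem.Dict Int Int) (h : InvD t m d)
    (a2 r : Int) (hv : d.get? (a2 + r) = none) : g (t.drop m) a2 r = 0 := by
  rw [h (a2 + r), Option.map_eq_none_iff] at hv
  exact g_of_ffrom_none _ _ _ hv

lemma invD_some (t : List Int) (m : Nat) (d : PySem.Dict Int Int) (h : InvD t m d)
    (a2 r jI : Int) (hv : d.get? (a2 + r) = some jI) :
    ∃ j : Nat, jI = (j : Int) ∧ m ≤ j ∧ j < t.length ∧ t.getD j 0 = a2 + r ∧
      g (t.drop m) a2 r = 1 + g (t.drop (j + 1)) (a2 + r) r := by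
  rw [h (a2 + r), Option.map_eq_some_iff] at hv
  obtain ⟨m', hm', hcast⟩ := hv
  obtain ⟨hlt, hget⟩ := ffrom_spec _ _ _ hm'
  rw [List.length_drop] at hlt
  have hb : m + m' < t.length := by omega
  refine ⟨m + m', hcast.symm, by omega, hb, ?_, ?_⟩
  · rw [List.getD_eq_getElem t 0 hb]
    rw [List.getD_eq_getElem _ 0 (by rw [List.length_drop]; omega)] at hget
    rw [List.getElem_drop] at hget
    exact hget
  · have hg := g_of_ffrom_some (t.drop m) a2 r m' hm'
    rw [List.drop_drop, show m + (m' + 1) = (m + m') + 1 by omega] at hg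
    exact hg

lemma soundL_insert (t : List Int) (k : Nat) (hk : k < t.length) (r : Int)
    (L : PySem.Dict (Int × Int) Int) (hS : SoundL t L)
    (v : Int) (hv : v = Gc t k r) : SoundL t (L.insert (((k : Nat) : Int), r) v) := by
  intro k' r' c' hk' hget
  rw [PySem.Dict.get?_insert] at hget
  by_cases he : ((((k' : Nat)) : Int), r') = ((((k : Nat)) : Int), r)
  · rw [if_pos he] at hget
    have he1 : ((k' : Nat) : Int) = ((k : Nat) : Int) := congrArg Prod.fst he
    have he2 : r' = r := congrArg Prod.snd he
    have hkk : k' = k := by exact_mod_cast he1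
    injection hget with hc
    subst hkk; subst he2
    rw [← hc, hv]
  · rw [if_neg he] at hget
    exact hS k' r' c' hk' hget

-- what B's inner loop establishes: sound values, monotone key set,
-- the processed pairs tabulated, and the total advanced by their contributions
def InnerRes (t : List Int) (k : Nat) (is : List Nat)
    (L : PySem.Dict (Int × Int) Int) (total : Int)
    (res : PySem.Dict (Int × Int) Int × Int) : Prop :=
  SoundL t res.1 ∧
  (∀ p, L.contains p = true → res.1.contains p = true) ∧
  (∀ i ∈ is, res.1.contains (((k : Nat) : Int), t.getD k 0 - t.getD i 0) = true) ∧
  res.2 = total + (is.map (fun i => Qc t i k)).sum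

lemma inner_step (t : List Int) (k : Nat) (hk : k < t.length)
    (d : PySem.Dict Int Int) (hd : InvD t (k + 1) d)
    (i : Nat) (L : PySem.Dict (Int × Int) Int) (total : Int)
    (hS : SoundL t L) (hC : CompleteL t (k + 1) L) :
    ∃ L', bInnerStep t d (t.getD k 0) ((k : Nat) : Int) (L, total) ((i : Nat) : Int)
        = (L', total + Qc t i k) ∧
      SoundL t L' ∧ (∀ p, L.contains p = true → L'.contains p = true) ∧
      L'.contains (((k : Nat) : Int), t.getD k 0 - t.getD i 0) = true := by
  have hr : PySem.List.pyGetD t ((i : Nat) : Int) 0 = t.getD i 0 := by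
    rw [PySem.List.pyGetD_of_nonneg t 0 (by positivity), Int.toNat_natCast]
  unfold bInnerStep
  rw [hr]
  dsimp only
  set r : Int := t.getD k 0 - t.getD i 0 with hrdef
  have hQ : Qc t i k = Gc t k r := rfl
  by_cases hc : L.contains (((k : Nat) : Int), r) = true
  · rw [if_pos hc]
    have hg : ∃ c, L.get? (((k : Nat) : Int), r) = some c := by
      rw [PySem.Dict.contains_eq_isSome_get?] at hc
      exact Option.isSome_iff_exists.mp hc
    obtain ⟨c, hcg⟩ := hg
    have hcv : c = Gc t k r := hS k r c hk hcg
    refine ⟨L, ?_, hS, fun p hp => hp, hc⟩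
    rw [PySem.Dict.getD_eq_get?_getD, hcg]
    simp [hQ, hcv]
  · rw [if_neg hc]
    cases hdg : d.get? (t.getD k 0 + r) with
    | none =>
        have hzero : Gc t k r = 0 := invD_none t (k + 1) d hd (t.getD k 0) r hdg
        refine ⟨L.insert (((k : Nat) : Int), r) 0, ?_,
          soundL_insert t k hk r L hS 0 hzero.symm, ?_, ?_⟩
        · rw [PySem.Dict.getD_eq_get?_getD, PySem.Dict.get?_insert, if_pos rfl]
          simp [hQ, hzero]
        · intro p hp
          rw [PySem.Dict.contains_insert]
          simp [hp]
        · exact PySem.Dict.contains_insert_self ..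
    | some jI =>
        obtain ⟨j, hj1, hj2, hj3, hj4, hj5⟩ :=
          invD_some t (k + 1) d hd (t.getD k 0) r jI hdg
        have hGk : Gc t k r = 1 + Gc t j r := by
          unfold Gc
          rw [hj5, hj4]
        have hrj : t.getD j 0 - t.getD k 0 = r := by rw [hj4]; ring
        have hcj : L.contains (((j : Nat) : Int), r) = true := by
          have := hC j k hj2 hj3 (by omega)
          rwa [hrj] at this
        have hgj : ∃ c, L.get? (((j : Nat) : Int), r) = some c := by
          rw [PySem.Dict.contains_eq_isSome_get?] at hcj
          exact Option.isSome_iff_exists.mp hcj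
        obtain ⟨c, hcg⟩ := hgj
        have hcv : c = Gc t j r := hS j r c hj3 hcg
        have hlook : L.getD (jI, r) 0 = Gc t j r := by
          rw [hj1, PySem.Dict.getD_eq_get?_getD, hcg, hcv]
          rfl
        refine ⟨L.insert (((k : Nat) : Int), r) (1 + L.getD (jI, r) 0), ?_,
          soundL_insert t k hk r L hS _ (by rw [hlook, ← hGk]), ?_, ?_⟩
        · rw [PySem.Dict.getD_eq_get?_getD, PySem.Dict.get?_insert, if_pos rfl]
          simp only [Option.getD_some]
          rw [hlook, hQ, hGk]
        · intro p hp
          rw [PySem.Dict.contains_insert]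
          simp [hp]
        · exact PySem.Dict.contains_insert_self ..

lemma inner_loop (t : List Int) (k : Nat) (hk : k < t.length)
    (d : PySem.Dict Int Int) (hd : InvD t (k + 1) d) :
    ∀ (is : List Nat), (∀ i ∈ is, i < k) →
    ∀ (L : PySem.Dict (Int × Int) Int) (total : Int),
      SoundL t L → CompleteL t (k + 1) L →
      InnerRes t k is L total
        ((is.map (fun i => ((i : Nat) : Int))).foldl
          (bInnerStep t d (t.getD k 0) ((k : Nat) : Int)) (L, total)) := by
  intro is
  induction is with
  | nil =>
      intro _ L total hS _
      exact ⟨hS, fun p hp => hp, by simp, by simp⟩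
  | cons i is' ih =>
      intro his L total hS hC
      obtain ⟨L', hstep, hS', hmono', hkey'⟩ :=
        inner_step t k hk d hd i L total hS hC
      simp only [List.map_cons, List.foldl_cons]
      rw [hstep]
      have hC' : CompleteL t (k + 1) L' := fun k' i' h1 h2 h3 =>
        hmono' _ (hC k' i' h1 h2 h3)
      obtain ⟨hS'', hmono'', hkeys'', htot''⟩ :=
        ih (fun i hi => his i (List.mem_cons_of_mem _ hi)) L' (total + Qc t i k) hS' hC'
      refine ⟨hS'', fun p hp => hmono'' p (hmono' p hp), ?_, ?_⟩
      · intro i' hi'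
        rcases List.mem_cons.mp hi' with h | h
        · subst h; exact hmono'' _ hkey'
        · exact hkeys'' i' h
      · rw [htot'']
        simp only [List.map_cons, List.sum_cons]
        ring

lemma outer_loop (t : List Int) : ∀ (m : Nat), m ≤ t.length →
    ∀ (d : PySem.Dict Int Int) (L : PySem.Dict (Int × Int) Int) (total : Int),
      InvD t m d → SoundL t L → CompleteL t m L → total = TotalFrom t m →
      ((PySem.List.pyRange ((m : Int) - 1) (-1) (-1)).foldl (bOuterStep t)
        (d, L, total)).2.2 = TotalFrom t 0 := by
  intro m
  induction m with
  | zero =>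
      intro _ d L total _ _ _ htot
      rw [show ((0 : Nat) : Int) - 1 = -1 by norm_num,
        show PySem.List.pyRange (-1) (-1) (-1) = [] from rfl]
      simpa using htot
  | succ m ih =>
      intro hm d L total hd hS hC htot
      have hml : m < t.length := by omega
      rw [show ((m + 1 : Nat) : Int) - 1 = (m : Int) by push_cast; ring,
        pyRange_down_cons m, List.foldl_cons]
      have hgm : PySem.List.pyGetD t ((m : Nat) : Int) 0 = t.getD m 0 := by
        rw [PySem.List.pyGetD_of_nonneg t 0 (by positivity), Int.toNat_natCast]
      have hb : bOuterStep t (d, L, total) ((m : Nat) : Int)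
          = (d.insert (t.getD m 0) ((m : Nat) : Int),
             ((List.range m).map (fun i => ((i : Nat) : Int))).foldl
               (bInnerStep t d (t.getD m 0) ((m : Nat) : Int)) (L, total)) := by
        unfold bOuterStep
        rw [hgm, PySem.List.pyRange_zero_natCast]
      rw [hb]
      obtain ⟨hS', hmono, hkey, htot'⟩ :=
        inner_loop t m hml d hd (List.range m)
          (fun i hi => List.mem_range.mp hi) L total hS hC
      apply ih (by omega)
      · exact invD_insert t m hml d hd
      · exact hS'
      · intro k' i hk1 hk2 hik
        by_cases hkm : k' = m
        · subst hkm; exact hkey i (List.mem_range.mpr hik)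
        · exact hmono _ (hC k' i (by omega) hk2 hik)
      · rw [htot', htot, sum_map_range]
        unfold TotalFrom
        rw [Finset.sum_eq_sum_Ico_succ_bot hml]
        ring

lemma b_eq (t : List Int) : podciagi_ar_alt t = TotalFrom t 0 := by
  show (List.foldl (bOuterStep t) (PySem.Dict.empty, PySem.Dict.empty, 0)
    (PySem.List.pyRange (PySem.List.len t - 1) (-1) (-1))).2.2 = _
  have hlen : PySem.List.len t = (t.length : Int) := rfl
  rw [hlen]
  exact outer_loop t t.length le_rfl _ _ _ (invD_init t)
    (fun k' r c hk hg => by rw [PySem.Dict.get?_empty] at hg; cases hg)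
    (fun k' i h1 h2 _ => absurd h2 (by omega))
    (by unfold TotalFrom; rw [Finset.Ico_self]; simp)

-- ===== VERDICT (by name: the statement is the Claim_ definition above) =====
theorem podciagi_ar_spec : Claim_equal_podciagi_ar := by
  intro t _
  show podciagi_ar t = podciagi_ar_alt t
  rw [a_eq, b_eq]
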